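-- pv_equiv track=rewrite | github.com/Nivola/beehive | beehive/common/model/__init__.py | get_all_valid_objids
-- ===== SOURCE A (Python) =====
-- def get_all_valid_objids(args):
--     """Get a list of authorization ids that map object
--
--     :param args: objid split by //
--     :return: list of valid objids
--     """
--     # first item *.*.*.....
--     act_obj = ['*' for i in args]
--     objdis = ['//'.join(act_obj)]
--     if args[0] != '*':
--         pos = 0
--         for arg in args:
--             act_obj[pos] = arg
--             objdis.append('//'.join(act_obj))
--             pos += 1
--
--     return objdis
-- ===== SOURCE B (Python) =====
-- def get_all_valid_objids(args):
--     n = len(args)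
--     star_only = args[0] == '*'
--     # stage 1: table of star-run strings; st[k] == '//'.join(['*'] * k)
--     st = [''] * (n + 1)
--     for k in range(1, n + 1):
--         st[k] = '*' if k == 1 else st[k - 1] + '//*'
--     if star_only:
--         return [st[n]]
--     # stage 2: extend the joined prefix one element at a time and glue the
--     # precomputed star suffix; no list is re-joined.
--     out = [st[n]]
--     pre = ''
--     for i, a in enumerate(args):
--         pre = a if i == 0 else pre + '//' + a
--         out.append(pre + '//' + st[n - i - 1] if i < n - 1 else pre)
--     return out
-- ===== Notes on version B (the rewrite author's own statement) =====
-- stated objective: alternative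
-- what changed: Replaced A's single pass that mutates a shared act_obj list and re-joins the whole list at every step by two staged passes: a precomputed table of star-run strings, then an incrementally extended joined-prefix string glued to the precomputed star suffix, so no list is ever re-joined.
-- outside the precondition, e.g. on get_all_valid_objids([]): A raises IndexError, B raises IndexError
import Mathlib
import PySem

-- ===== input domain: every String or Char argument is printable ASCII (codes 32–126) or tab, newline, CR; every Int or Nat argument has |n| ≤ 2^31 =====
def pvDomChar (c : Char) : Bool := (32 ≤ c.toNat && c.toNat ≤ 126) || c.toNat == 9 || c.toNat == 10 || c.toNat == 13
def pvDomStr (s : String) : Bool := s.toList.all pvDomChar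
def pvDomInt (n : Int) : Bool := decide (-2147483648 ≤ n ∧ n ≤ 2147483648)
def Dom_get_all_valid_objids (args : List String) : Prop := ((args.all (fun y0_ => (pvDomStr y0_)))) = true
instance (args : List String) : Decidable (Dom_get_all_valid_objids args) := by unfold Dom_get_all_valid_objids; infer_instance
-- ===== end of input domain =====

-- B drops A's shared mutable act_obj and per-step full-list re-join: it precomputes
-- the star-run strings once and extends a joined prefix string incrementally
-- (objective: alternative decomposition; no speed claimed).

-- ===== PORT A =====
-- the 'for arg in args' loop: mutates act_obj at pos, appends the joined string
def getAllValidObjidsLoopA : List String → List String → List String → Nat → List String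
  | [], _, objdis, _ => objdis
  | arg :: rest, act_obj, objdis, pos =>
      let act' := act_obj.set pos arg
      getAllValidObjidsLoopA rest act' (objdis ++ [PySem.Str.join "//" act']) (pos + 1)

def get_all_valid_objids (args : List String) : List String :=
  let act_obj := args.map (fun _ => "*")
  let objdis := [PySem.Str.join "//" act_obj]
  match PySem.List.pyGet? args 0 with
  | none => []          -- args[0] raises IndexError on empty args (excluded by Pre_)
  | some a0 => if a0 ≠ "*" then getAllValidObjidsLoopA args act_obj objdis 0 else objdis

-- ===== PORT B =====
-- stage 1 of Source B: the star-run table st; st[k] = '*' for k = 1, st[k-1] + '//*' after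
def pvStarStr : Nat → String
  | 0 => ""
  | 1 => "*"
  | (k + 2) => pvStarStr (k + 1) ++ "//*"

-- stage 2 of Source B: the enumerate loop extending pre and gluing the star suffix
def pvAltLoop : List String → Nat → Nat → String → List String → List String
  | [], _, _, _, out => out
  | a :: rest, i, n, pre, out =>
      let pre' := if i = 0 then a else pre ++ "//" ++ a
      let e := if i < n - 1 then pre' ++ "//" ++ pvStarStr (n - i - 1) else pre'
      pvAltLoop rest (i + 1) n pre' (out ++ [e])

def get_all_valid_objids_alt (args : List String) : List String :=
  let n := args.length
  match PySem.List.pyGet? args 0 with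
  | none => []          -- args[0] raises IndexError on empty args (excluded by Pre_)
  | some a0 =>
    if a0 = "*" then [pvStarStr n]
    else pvAltLoop args 0 n "" [pvStarStr n]

-- ===== PRECONDITION & SPEC =====
-- A (and B) raise IndexError on args = [] at args[0]; Pre_ excludes exactly that.
def Pre_get_all_valid_objids (args : List String) : Prop := args ≠ []
instance (args : List String) : Decidable (Pre_get_all_valid_objids args) := by unfold Pre_get_all_valid_objids; infer_instance
def pvWitness_get_all_valid_objids : List String := (["a", "b"])

def Spec_get_all_valid_objids (args : List String) (out : List String) : Prop := out = get_all_valid_objids_alt args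
instance (args : List String) (out : List String) : Decidable (Spec_get_all_valid_objids args out) := by unfold Spec_get_all_valid_objids; infer_instance

-- ===== CLAIM (what is proved, stated in full; the proofs are below) =====
def Claim_equal_get_all_valid_objids : Prop := ∀ (args : List String), Dom_get_all_valid_objids args → Pre_get_all_valid_objids args → Spec_get_all_valid_objids args (get_all_valid_objids args)

-- ===== LEMMAS AND PROOFS =====

theorem join_one (s a : String) : PySem.Str.join s [a] = a := by
  simp [PySem.Str.join, PySem.Chars.join_singleton]

theorem join_cons2 (s a b : String) (t : List String) :
    PySem.Str.join s (a :: b :: t) = a ++ s ++ PySem.Str.join s (b :: t) := by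
  simp [PySem.Str.join, PySem.Chars.join_cons_cons, String.append_assoc]

theorem join_append (s : String) (xs : List String) : ∀ (y : String) (ys : List String),
    PySem.Str.join s (xs ++ y :: ys)
      = (if xs = [] then PySem.Str.join s (y :: ys)
         else PySem.Str.join s xs ++ s ++ PySem.Str.join s (y :: ys)) := by
  induction xs with
  | nil => intro y ys; simp
  | cons x xs ih =>
    intro y ys
    rcases xs with _ | ⟨x', xs'⟩
    · simp [join_cons2, join_one]
    · simp only [List.cons_append]
      rw [join_cons2, show x' :: (xs' ++ y :: ys) = (x' :: xs') ++ y :: ys from rfl, ih]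
      simp [join_cons2, String.append_assoc]

theorem pvStarStr_eq : ∀ (k : Nat), pvStarStr k = PySem.Str.join "//" (List.replicate k "*") := by
  intro k
  induction k with
  | zero => simp [pvStarStr, PySem.Str.join, PySem.Chars.join_nil]
  | succ m ih =>
    rcases m with _ | m
    · simp [pvStarStr, join_one]
    · show pvStarStr (m + 1) ++ "//*" = _
      rw [ih]
      have h : List.replicate (m + 2) "*" = List.replicate (m + 1) "*" ++ ["*"] := by
        rw [← List.replicate_succ']
      rw [h, join_append]
      simp [join_one, String.append_assoc]

-- Invariant of B's stage-2 loop: having consumed 'done' (pre = its join, i = its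
-- length), the loop appends the index-driven strings for the remaining suffix.
theorem pvAltLoop_eq (rest : List String) : ∀ (done out : List String),
    pvAltLoop rest done.length (done.length + rest.length) (PySem.Str.join "//" done) out
      = out ++ (List.range rest.length).map
          (fun j => PySem.Str.join "//" ((done ++ rest).take (done.length + j + 1)
              ++ List.replicate (rest.length - j - 1) "*")) := by
  induction rest with
  | nil => intro done out; simp [pvAltLoop]
  | cons a rs ih =>
    intro done out
    simp only [pvAltLoop]
    have hpre : (if done.length = 0 then a else PySem.Str.join "//" done ++ "//" ++ a)
        = PySem.Str.join "//" (done ++ [a]) := by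
      rcases done with _ | ⟨d, ds⟩
      · simp [join_one]
      · rw [join_append]
        simp [join_one]
    rw [hpre]
    have htake : (done ++ a :: rs).take (done.length + 1) = done ++ [a] := by
      rw [show done ++ a :: rs = (done ++ [a]) ++ rs by simp,
        List.take_left' (by simp)]
    have he : (if done.length < done.length + (a :: rs).length - 1
          then PySem.Str.join "//" (done ++ [a]) ++ "//" ++ pvStarStr (done.length + (a :: rs).length - done.length - 1)
          else PySem.Str.join "//" (done ++ [a]))
        = PySem.Str.join "//" ((done ++ a :: rs).take (done.length + 1)
            ++ List.replicate ((a :: rs).length - 1) "*") := by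
      rw [htake]
      rcases rs with _ | ⟨r, rs'⟩
      · rw [if_neg (by simp)]
        simp
      · rw [if_pos (by simp only [List.length_cons]; omega),
          show done.length + (a :: r :: rs').length - done.length - 1 = rs'.length + 1 by
            simp only [List.length_cons]; omega,
          pvStarStr_eq,
          show List.replicate ((a :: r :: rs').length - 1) "*" = "*" :: List.replicate rs'.length "*" by
            simp [List.replicate_succ],
          show List.replicate (rs'.length + 1) "*" = "*" :: List.replicate rs'.length "*" by
            simp [List.replicate_succ],
          join_append, join_append]
        rcases done with _ | ⟨d, ds⟩ <;> rw [← hpre] <;>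
          simp [join_one, String.append_assoc]
    rw [he]
    have hcall := ih (done ++ [a]) (out ++ [PySem.Str.join "//" ((done ++ a :: rs).take (done.length + 1)
            ++ List.replicate ((a :: rs).length - 1) "*")])
    simp only [List.length_append, List.length_singleton] at hcall
    rw [show done.length + 1 + rs.length = done.length + (a :: rs).length by simp; omega] at hcall
    rw [hcall]
    simp only [List.length_cons]
    rw [List.range_succ_eq_map]
    simp only [List.map_cons, List.map_map]
    rw [List.append_assoc]
    simp only [List.singleton_append]
    congr 1
    congr 1
    apply List.map_congr_left
    intro j _
    simp only [Function.comp_apply]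
    simp only [Nat.succ_eq_add_one]
    rw [show done ++ [a] ++ rs = done ++ a :: rs by simp,
      show done.length + 1 + j + 1 = done.length + (j + 1) + 1 by omega,
      show rs.length + 1 - (j + 1) - 1 = rs.length - j - 1 by omega]

-- Characterisation of A's loop (same index-driven form), invariant on pre ++ stars.
theorem getAllValidObjidsLoopA_eq (rest : List String) : ∀ (pre acc : List String),
    getAllValidObjidsLoopA rest (pre ++ List.replicate rest.length "*") acc pre.length
      = acc ++ (List.range rest.length).map
          (fun i => PySem.Str.join "//" (pre ++ rest.take (i + 1) ++ List.replicate (rest.length - (i + 1)) "*")) := by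
  induction rest with
  | nil => intro pre acc; simp [getAllValidObjidsLoopA]
  | cons a rs ih =>
    intro pre acc
    have hset : (pre ++ List.replicate (a :: rs).length "*").set pre.length a
        = (pre ++ [a]) ++ List.replicate rs.length "*" := by
      simp [List.replicate_succ]
    simp only [getAllValidObjidsLoopA, hset]
    have := ih (pre ++ [a]) (acc ++ [PySem.Str.join "//" ((pre ++ [a]) ++ List.replicate rs.length "*")])
    simp only [List.length_append, List.length_singleton] at this
    rw [this]
    simp only [List.length_cons]
    rw [List.range_succ_eq_map]
    simp [List.append_assoc, Function.comp]

theorem get_all_valid_objids_eq (args : List String) (h : args ≠ []) :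
    get_all_valid_objids args = get_all_valid_objids_alt args := by
  obtain ⟨a0, rest, rfl⟩ := List.exists_cons_of_ne_nil h
  unfold get_all_valid_objids get_all_valid_objids_alt
  have hget : PySem.List.pyGet? (a0 :: rest) 0 = some a0 := by
    simp [PySem.List.pyGet?, PySem.List.pyIdx?]
  have hstars : (a0 :: rest).map (fun _ => "*") = List.replicate (a0 :: rest).length "*" := by
    simp [List.map_const', List.length_cons, List.replicate_succ]
  simp only [hget, hstars]
  by_cases ha : a0 = "*"
  · simp [ha, pvStarStr_eq]
  · simp only [ha, if_neg, ne_eq, not_false_eq_true, if_true]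
    have hA := getAllValidObjidsLoopA_eq (a0 :: rest) [] [PySem.Str.join "//" (List.replicate (a0 :: rest).length "*")]
    simp only [List.nil_append, List.length_nil] at hA
    have hB := pvAltLoop_eq (a0 :: rest) [] [pvStarStr (a0 :: rest).length]
    simp only [List.nil_append, List.length_nil, Nat.zero_add] at hB
    have hjoin0 : PySem.Str.join "//" ([] : List String) = "" := by
      simp [PySem.Str.join, PySem.Chars.join_nil]
    rw [← hjoin0, hB, hA, pvStarStr_eq]
    congr 1

-- ===== VERDICT (by name: the statement is the Claim_ definition above) =====
theorem get_all_valid_objids_spec : Claim_equal_get_all_valid_objids := by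
  intro args _ hpre
  unfold Spec_get_all_valid_objids
  exact (get_all_valid_objids_eq args hpre)
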